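-- pv_equiv track=rewrite | github.com/tenstorrent/tt-metal | profile_matmul_unified.py | find_max_subblock
-- ===== SOURCE A (Python) =====
-- def find_max_subblock(out_block_h, out_block_w, max_dst=8):
--     best_h, best_w, best_area = 1, 1, 1
--     for sh in range(1, out_block_h + 1):
--         if out_block_h % sh != 0:
--             continue
--         for sw in range(1, out_block_w + 1):
--             if out_block_w % sw != 0:
--                 continue
--             if sh * sw <= max_dst and sh * sw >= best_area:
--                 best_h, best_w, best_area = sh, sw, sh * sw
--     return best_h, best_w, best_area
-- ===== SOURCE B (Python) =====
-- def _divisors(n):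
--     small, large = [], []
--     i = 1
--     while i * i <= n:
--         if n % i == 0:
--             small.append(i)
--             q = n // i
--             if q != i:
--                 large.append(q)
--         i += 1
--     return small + large[::-1]
--
--
-- def find_max_subblock(out_block_h, out_block_w, max_dst=8):
--     # best as (area, sh, sw); lexicographic max replicates A's tie-break
--     # (largest area, then largest sh, then largest sw).
--     best = (1, 1, 1)
--     for sh in _divisors(out_block_h):
--         for sw in _divisors(out_block_w):
--             a = sh * sw
--             if a <= max_dst:
--                 best = max(best, (a, sh, sw))
--     return best[1], best[2], best[0]
-- ===== Notes on version B (the rewrite author's own statement) =====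
-- stated objective: faster
-- what changed: Instead of scanning all h*w candidate pairs, B enumerates only the divisors of each dimension via trial division up to sqrt (small/large divisor pairing), then takes the lexicographic max of (area, sh, sw) over the divisor grid, which reproduces A's last-wins tie-break.
import Mathlib
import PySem

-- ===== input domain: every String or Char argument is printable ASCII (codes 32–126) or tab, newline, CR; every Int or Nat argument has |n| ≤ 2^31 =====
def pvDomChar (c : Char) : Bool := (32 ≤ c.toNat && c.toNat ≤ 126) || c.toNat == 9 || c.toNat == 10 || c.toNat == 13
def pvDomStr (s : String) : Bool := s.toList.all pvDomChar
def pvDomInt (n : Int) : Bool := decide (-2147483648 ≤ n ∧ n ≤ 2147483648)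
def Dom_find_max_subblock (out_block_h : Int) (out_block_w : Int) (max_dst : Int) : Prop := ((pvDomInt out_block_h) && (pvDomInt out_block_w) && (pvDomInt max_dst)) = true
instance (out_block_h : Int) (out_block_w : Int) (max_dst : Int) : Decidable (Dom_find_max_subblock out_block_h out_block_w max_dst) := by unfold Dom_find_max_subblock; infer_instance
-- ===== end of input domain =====

-- B replaces A's full h×w scan by enumerating only the divisors of each dimension
-- (trial division up to sqrt, small/large pairing) and taking the lexicographic
-- max of (area, sh, sw), which reproduces A's tie-break; objective: faster.

-- ===== PORT A =====
def find_max_subblock (out_block_h : Int) (out_block_w : Int) (max_dst : Int) : List Int :=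
  let res := (PySem.List.pyRange 1 (out_block_h + 1) 1).foldl (fun st sh =>
    if PySem.Int.mod out_block_h sh ≠ 0 then st
    else (PySem.List.pyRange 1 (out_block_w + 1) 1).foldl (fun st2 sw =>
      if PySem.Int.mod out_block_w sw ≠ 0 then st2
      else if sh * sw ≤ max_dst ∧ sh * sw ≥ st2.2.2 then (sh, sw, sh * sw)
      else st2) st) (1, 1, 1)
  [res.1, res.2.1, res.2.2]

-- ===== PORT B =====
-- the `while i*i <= n` trial-division loop of _divisors; fuel only makes it total
def fmsDivAux (n : Int) (i : Int) (small large : List Int) : Nat → List Int × List Int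
  | 0 => (small, large)
  | fuel + 1 =>
    if i * i ≤ n then
      if PySem.Int.mod n i = 0 then
        let q := PySem.Int.floordiv n i
        fmsDivAux n (i + 1) (small ++ [i]) (if q ≠ i then large ++ [q] else large) fuel
      else fmsDivAux n (i + 1) small large fuel
    else (small, large)

def fmsDivisors (n : Int) : List Int :=
  let p := fmsDivAux n 1 [] [] (n.toNat + 1)
  p.1 ++ p.2.reverse

-- Python tuple comparison: max(b, t) = t if b < t lexicographically else b
def fmsLt (a b : Int × Int × Int) : Bool :=
  a.1 < b.1 || (a.1 == b.1 && (a.2.1 < b.2.1 || (a.2.1 == b.2.1 && a.2.2 < b.2.2)))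

def fmsMax (a b : Int × Int × Int) : Int × Int × Int := if fmsLt a b then b else a

def find_max_subblock_alt (out_block_h : Int) (out_block_w : Int) (max_dst : Int) : List Int :=
  let best := (fmsDivisors out_block_h).foldl (fun b sh =>
    (fmsDivisors out_block_w).foldl (fun b2 sw =>
      if sh * sw ≤ max_dst then fmsMax b2 (sh * sw, sh, sw) else b2) b) (1, 1, 1)
  [best.2.1, best.2.2, best.1]

-- ===== PRECONDITION & SPEC =====
def Spec_find_max_subblock (out_block_h : Int) (out_block_w : Int) (max_dst : Int) (out : List Int) : Prop := out = find_max_subblock_alt out_block_h out_block_w max_dst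
instance (out_block_h : Int) (out_block_w : Int) (max_dst : Int) (out : List Int) : Decidable (Spec_find_max_subblock out_block_h out_block_w max_dst out) := by unfold Spec_find_max_subblock; infer_instance

-- ===== CLAIM (what is proved, stated in full; the proofs are below) =====
def Claim_equal_find_max_subblock : Prop := ∀ (out_block_h : Int) (out_block_w : Int) (max_dst : Int), Dom_find_max_subblock out_block_h out_block_w max_dst → Spec_find_max_subblock out_block_h out_block_w max_dst (find_max_subblock out_block_h out_block_w max_dst)

-- ===== LEMMAS AND PROOFS =====

-- the ascending list of positive divisors of n (as A's filtered range produces it)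
def divList (n : Int) : List Int :=
  (PySem.List.pyRange 1 (n + 1) 1).filter (fun d => PySem.Int.mod n d == 0)

def fmsT (n i : Int) : List Int :=
  (PySem.List.pyRange i (n + 1) 1).filter (fun d => decide (d * d ≤ n) && (PySem.Int.mod n d == 0))

def fmsU (n i : Int) : List Int :=
  (fmsT n i).filterMap (fun d => if PySem.Int.floordiv n d ≠ d then some (PySem.Int.floordiv n d) else none)

lemma fmsT_nil_of_lt (n i : Int) (h : n < i) : fmsT n i = [] := by
  unfold fmsT
  rw [PySem.List.pyRange_one_eq_nil (by omega)]; rfl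
lemma fmsT_nil_of_sq (n i : Int) (h1 : 1 ≤ i) (h : n < i * i) : fmsT n i = [] := by
  unfold fmsT
  rw [List.filter_eq_nil_iff]
  intro d hd
  rw [PySem.List.mem_pyRange_one] at hd
  have : i * i ≤ d * d := mul_le_mul hd.1 hd.1 (by omega) (by omega)
  simp only [Bool.and_eq_true, decide_eq_true_eq]
  intro hc; omega
lemma fmsT_cons (n i : Int) (h1 : 1 ≤ i) (h : i * i ≤ n) :
    fmsT n i = (if decide (i * i ≤ n) && (PySem.Int.mod n i == 0) then i :: fmsT n (i+1) else fmsT n (i+1)) := by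
  have hin : i ≤ n := le_trans (le_mul_of_one_le_left (by omega) h1) h
  unfold fmsT
  rw [PySem.List.pyRange_one_cons (by omega), List.filter_cons]
lemma fmsDivAux_spec (n : Int) : ∀ (fuel : Nat) (i : Int) (small large : List Int),
    1 ≤ i → n < i + fuel →
    fmsDivAux n i small large fuel = (small ++ fmsT n i, large ++ fmsU n i) := by
  intro fuel
  induction fuel with
  | zero =>
    intro i small large h1 h2
    simp only [fmsDivAux]
    rw [fmsT_nil_of_lt n i (by omega)]
    simp [fmsU, fmsT_nil_of_lt n i (by omega)]
  | succ fuel ih =>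
    intro i small large h1 h2
    simp only [fmsDivAux]
    by_cases hsq : i * i ≤ n
    · simp only [if_pos hsq]
      by_cases hm : PySem.Int.mod n i = 0
      · simp only [if_pos hm]
        rw [ih (i+1) _ _ (by omega) (by omega)]
        have hT : fmsT n i = i :: fmsT n (i+1) := by
          rw [fmsT_cons n i h1 hsq]; simp [hsq, hm]
        have hU : fmsU n i = (if PySem.Int.floordiv n i ≠ i then [PySem.Int.floordiv n i] else []) ++ fmsU n (i+1) := by
          unfold fmsU
          rw [hT, List.filterMap_cons]
          by_cases hqi : PySem.Int.floordiv n i = i <;> simp [hqi]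
        rw [hT, hU]
        refine Prod.ext ?_ ?_
        · simp
        · by_cases hqi : PySem.Int.floordiv n i = i <;> simp [hqi]
      · simp only [if_neg hm]
        rw [ih (i+1) _ _ (by omega) (by omega)]
        have hT : fmsT n i = fmsT n (i+1) := by
          rw [fmsT_cons n i h1 hsq]; simp [hsq, hm]
        have hU : fmsU n i = fmsU n (i+1) := by unfold fmsU; rw [hT]
        rw [hT, hU]
    · simp only [if_neg hsq]
      rw [fmsT_nil_of_sq n i h1 (by omega)]
      simp [fmsU, fmsT_nil_of_sq n i h1 (by omega)]

lemma mem_fmsT (n x : Int) : x ∈ fmsT n 1 ↔ 1 ≤ x ∧ x * x ≤ n ∧ x ∣ n := by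
  unfold fmsT
  simp only [List.mem_filter, PySem.List.mem_pyRange_one, Bool.and_eq_true, decide_eq_true_eq,
    beq_iff_eq, PySem.Int.mod_eq_zero_iff_dvd]
  constructor
  · rintro ⟨⟨h1, _⟩, h2, h3⟩; exact ⟨h1, h2, h3⟩
  · rintro ⟨h1, h2, h3⟩
    exact ⟨⟨h1, by nlinarith⟩, h2, h3⟩

lemma div_facts {n d : Int} (hn : 1 ≤ n) (hd : 1 ≤ d) (hdvd : d ∣ n) :
    PySem.Int.floordiv n d = n / d ∧ d * (n / d) = n ∧ 1 ≤ n / d ∧ n / d ≤ n ∧ n / d ∣ n := by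
  obtain ⟨c, hc⟩ := hdvd
  refine ⟨PySem.Int.floordiv_eq_ediv_of_pos (by omega), ?_, ?_, Int.ediv_le_self d (by omega), ?_⟩
  · rw [mul_comm]; exact Int.ediv_mul_cancel ⟨c, hc⟩
  · rw [Int.le_ediv_iff_mul_le (by omega)]
    rcases le_or_gt c 0 with h | h
    · nlinarith
    · nlinarith
  · have h1 : n / d = c := by rw [hc, Int.mul_ediv_cancel_left c (by omega)]
    exact h1 ▸ ⟨d, by linarith [hc, mul_comm d c]⟩

lemma mem_fmsU (n x : Int) (hn : 1 ≤ n) :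
    x ∈ fmsU n 1 ↔ 1 ≤ x ∧ n < x * x ∧ x ∣ n := by
  unfold fmsU
  rw [List.mem_filterMap]
  constructor
  · rintro ⟨d, hdT, hd⟩
    rw [mem_fmsT] at hdT
    obtain ⟨hd1, hdsq, hdvd⟩ := hdT
    obtain ⟨hfd, hmul, hq1, hqn, hqdvd⟩ := div_facts hn hd1 hdvd
    by_cases hne : PySem.Int.floordiv n d = d
    · simp [hne] at hd
    · simp only [if_pos (by exact hne)] at hd
      obtain rfl : x = n / d := by rw [← hfd]; exact (Option.some_inj.mp hd).symm
      rw [hfd] at hne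
      have hdlt : d < n / d := by rcases lt_or_eq_of_le (by nlinarith : d ≤ n / d) with h | h; exact h; exact absurd h.symm hne
      exact ⟨hq1, by nlinarith, hqdvd⟩
  · rintro ⟨hx1, hxsq, hxdvd⟩
    obtain ⟨hfd, hmul, hq1, hqn, hqdvd⟩ := div_facts hn hx1 hxdvd
    refine ⟨n / x, ?_, ?_⟩
    · rw [mem_fmsT]
      exact ⟨hq1, by nlinarith, hqdvd⟩
    · obtain ⟨hfd2, hmul2, hq2, _, _⟩ := div_facts hn hq1 hqdvd
      have hinv : n / (n / x) = x := by
        have := hmul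
        calc n / (n / x) = (n / x) * x / (n / x) := by rw [mul_comm, this]
        _ = x := Int.mul_ediv_cancel_left x (by omega)
      have hxne : x ≠ n / x := by intro h; rw [← h] at hmul; nlinarith
      rw [hfd2, hinv]
      simp [hxne]

lemma mem_divList (n x : Int) : x ∈ divList n ↔ 1 ≤ x ∧ x ≤ n ∧ x ∣ n := by
  unfold divList
  simp only [List.mem_filter, PySem.List.mem_pyRange_one, beq_iff_eq, PySem.Int.mod_eq_zero_iff_dvd]
  constructor
  · rintro ⟨⟨h1, h2⟩, h3⟩; exact ⟨h1, by omega, h3⟩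
  · rintro ⟨h1, h2, h3⟩; exact ⟨⟨h1, by omega⟩, h3⟩

lemma pairwise_fmsT (n : Int) : (fmsT n 1).Pairwise (· < ·) := by
  unfold fmsT
  exact (PySem.List.pairwise_lt_pyRange_one 1 (n+1)).filter _

lemma pairwise_fmsU_rev (n : Int) (hn : 1 ≤ n) : ((fmsU n 1).reverse).Pairwise (· < ·) := by
  rw [List.pairwise_reverse]
  unfold fmsU
  rw [List.pairwise_filterMap]
  have h := (List.Pairwise.and_mem.mp (pairwise_fmsT n))
  refine h.imp ?_
  rintro a b ⟨haT, hbT, hab⟩ x hx y hy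
  rw [mem_fmsT] at haT hbT
  obtain ⟨ha1, hasq, hadvd⟩ := haT
  obtain ⟨hb1, hbsq, hbdvd⟩ := hbT
  obtain ⟨hfa, hmula, hqa1, _, _⟩ := div_facts hn ha1 hadvd
  obtain ⟨hfb, hmulb, hqb1, _, _⟩ := div_facts hn hb1 hbdvd
  have hxv : x = n / a := by
    by_cases h : PySem.Int.floordiv n a = a
    · simp [h] at hx
    · simp [hfa] at hx
      exact hx.2.symm
  have hyv : y = n / b := by
    by_cases h : PySem.Int.floordiv n b = b
    · simp [h] at hy
    · simp [hfb] at hy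
      exact hy.2.symm
  subst hxv hyv
  nlinarith

lemma cross_fmsT_fmsU (n : Int) (hn : 1 ≤ n) :
    ∀ x ∈ fmsT n 1, ∀ y ∈ (fmsU n 1).reverse, x < y := by
  intro x hx y hy
  rw [List.mem_reverse, mem_fmsU n y hn] at hy
  rw [mem_fmsT] at hx
  obtain ⟨hx1, hxsq, _⟩ := hx
  obtain ⟨hy1, hysq, _⟩ := hy
  nlinarith

lemma fmsDivisors_eq (n : Int) : fmsDivisors n = divList n := by
  have hspec := fmsDivAux_spec n (n.toNat + 1) 1 [] [] (by omega) (by omega)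
  unfold fmsDivisors
  rw [hspec]
  simp only [List.nil_append]
  by_cases hn : 1 ≤ n
  · -- both lists are strictly sorted with the same members
    have hpw1 : (fmsT n 1 ++ (fmsU n 1).reverse).Pairwise (· < ·) := by
      rw [List.pairwise_append]
      exact ⟨pairwise_fmsT n, pairwise_fmsU_rev n hn, cross_fmsT_fmsU n hn⟩
    have hpw2 : (divList n).Pairwise (· < ·) := by
      unfold divList
      exact (PySem.List.pairwise_lt_pyRange_one 1 (n+1)).filter _
    have hmem : ∀ a, a ∈ fmsT n 1 ++ (fmsU n 1).reverse ↔ a ∈ divList n := by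
      intro a
      rw [List.mem_append, List.mem_reverse, mem_fmsT, mem_fmsU n a hn, mem_divList]
      constructor
      · rintro (⟨h1, h2, h3⟩ | ⟨h1, h2, h3⟩)
        · exact ⟨h1, by nlinarith, h3⟩
        · exact ⟨h1, by nlinarith [Int.le_of_dvd (by omega) h3], h3⟩
      · rintro ⟨h1, h2, h3⟩
        by_cases hsq : a * a ≤ n
        · exact Or.inl ⟨h1, hsq, h3⟩
        · exact Or.inr ⟨h1, by omega, h3⟩
    have hperm : (fmsT n 1 ++ (fmsU n 1).reverse).Perm (divList n) :=
      (List.perm_ext_iff_of_nodup hpw1.nodup hpw2.nodup).mpr hmem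
    exact List.Perm.eq_of_pairwise (le := (· ≤ ·)) (fun a b _ _ h1 h2 => le_antisymm h1 h2)
      (hpw1.imp le_of_lt) (hpw2.imp le_of_lt) hperm
  · rw [fmsT_nil_of_sq n 1 (by omega) (by omega)]
    have : fmsU n 1 = [] := by
      unfold fmsU; rw [fmsT_nil_of_sq n 1 (by omega) (by omega)]; rfl
    rw [this]
    unfold divList
    rw [PySem.List.pyRange_one_eq_nil (by omega)]
    rfl

lemma main_invariant (md : Int) :
    ∀ (L : List (Int × Int)) (st : Int × Int × Int),
    (∀ p ∈ L, 1 ≤ p.1 ∧ 1 ≤ p.2) →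
    L.Pairwise (fun p q => p.1 < q.1 ∨ (p.1 = q.1 ∧ p.2 < q.2)) →
    (∀ p ∈ L, st.1 < p.1 ∨ (st.1 = p.1 ∧ st.2.1 ≤ p.2)) →
    L.foldl (fun st2 p =>
        if p.1 * p.2 ≤ md ∧ p.1 * p.2 ≥ st2.2.2 then (p.1, p.2, p.1 * p.2) else st2) st
    = (fun b => (b.2.1, b.2.2, b.1))
        (L.foldl (fun b2 p =>
          if p.1 * p.2 ≤ md then fmsMax b2 (p.1 * p.2, p.1, p.2) else b2) (st.2.2, st.1, st.2.1)) := by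
  intro L
  induction L with
  | nil => intro st _ _ _; rfl
  | cons p L ih =>
    intro st hpos hpw hinv
    simp only [List.foldl_cons]
    by_cases hmd : p.1 * p.2 ≤ md
    · by_cases hge : p.1 * p.2 ≥ st.2.2
      · rw [if_pos ⟨hmd, hge⟩, if_pos hmd]
        have hmax : fmsMax (st.2.2, st.1, st.2.1) (p.1 * p.2, p.1, p.2) = (p.1 * p.2, p.1, p.2) := by
          rcases lt_or_eq_of_le hge with hlt | heq
          · have ht : fmsLt (st.2.2, st.1, st.2.1) (p.1 * p.2, p.1, p.2) = true := by
              simp only [fmsLt]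
              simp only [Bool.or_eq_true, Bool.and_eq_true, decide_eq_true_eq, beq_iff_eq]
              exact Or.inl hlt
            simp [fmsMax, ht]
          · rcases hinv p (List.mem_cons_self) with h | ⟨h1, h2⟩
            · have ht : fmsLt (st.2.2, st.1, st.2.1) (p.1 * p.2, p.1, p.2) = true := by
                simp only [fmsLt]
                simp only [Bool.or_eq_true, Bool.and_eq_true, decide_eq_true_eq, beq_iff_eq]
                exact Or.inr ⟨heq, Or.inl h⟩
              simp [fmsMax, ht]
            · rcases lt_or_eq_of_le h2 with h2' | h2'
              · have ht : fmsLt (st.2.2, st.1, st.2.1) (p.1 * p.2, p.1, p.2) = true := by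
                  simp only [fmsLt]
                  simp only [Bool.or_eq_true, Bool.and_eq_true, decide_eq_true_eq, beq_iff_eq]
                  exact Or.inr ⟨heq, Or.inr ⟨h1, h2'⟩⟩
                simp [fmsMax, ht]
              · -- complete tie: both tuples are equal
                rw [heq, h1, h2']
                unfold fmsMax
                split <;> rfl
        rw [hmax]
        have := ih (p.1, p.2, p.1 * p.2) (fun q hq => hpos q (List.mem_cons_of_mem _ hq))
          (List.Pairwise.of_cons hpw)
          (fun q hq => by
            rcases (List.pairwise_cons.mp hpw).1 q hq with h | ⟨h1, h2⟩
            · exact Or.inl h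
            · exact Or.inr ⟨h1, le_of_lt h2⟩)
        exact this
      · rw [if_neg (fun hc => hge hc.2), if_pos hmd]
        have hmax : fmsMax (st.2.2, st.1, st.2.1) (p.1 * p.2, p.1, p.2) = (st.2.2, st.1, st.2.1) := by
          have ht : fmsLt (st.2.2, st.1, st.2.1) (p.1 * p.2, p.1, p.2) = false := by
            simp only [fmsLt]
            simp only [Bool.or_eq_false_iff, Bool.and_eq_false_iff, decide_eq_false_iff_not,
              beq_eq_false_iff_ne, ne_eq]
            constructor
            · intro h; exact hge (le_of_lt h)
            · left; intro h; exact hge (le_of_eq h)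
          simp [fmsMax, ht]
        rw [hmax]
        exact ih st (fun q hq => hpos q (List.mem_cons_of_mem _ hq)) (List.Pairwise.of_cons hpw)
          (fun q hq => hinv q (List.mem_cons_of_mem _ hq))
    · rw [if_neg (fun hc => hmd hc.1), if_neg hmd]
      exact ih st (fun q hq => hpos q (List.mem_cons_of_mem _ hq)) (List.Pairwise.of_cons hpw)
        (fun q hq => hinv q (List.mem_cons_of_mem _ hq))

lemma foldl_skip_filter {σ : Type} (n : Int) (g : σ → Int → σ) :
    ∀ (l : List Int) (init : σ),
    l.foldl (fun st x => if PySem.Int.mod n x ≠ 0 then st else g st x) init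
    = (l.filter (fun d => PySem.Int.mod n d == 0)).foldl g init := by
  intro l
  induction l with
  | nil => intro init; rfl
  | cons x l ih =>
    intro init
    rw [List.foldl_cons, List.filter_cons]
    by_cases hm : PySem.Int.mod n x = 0
    · rw [if_neg (by simp [hm]), if_pos (by simp [hm]), List.foldl_cons]
      exact ih (g init x)
    · rw [if_pos hm, if_neg (by simp [hm])]
      exact ih init

lemma foldl_nested {σ : Type} (f : σ → Int × Int → σ) :
    ∀ (l1 : List Int) (l2 : List Int) (init : σ),
    l1.foldl (fun st a => l2.foldl (fun st2 b => f st2 (a, b)) st) init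
    = (l1.flatMap (fun a => l2.map (fun b => (a, b)))).foldl f init := by
  intro l1
  induction l1 with
  | nil => intro l2 init; rfl
  | cons a l1 ih =>
    intro l2 init
    simp only [List.foldl_cons, List.flatMap_cons, List.foldl_append, List.foldl_map]
    exact ih l2 _

lemma pairwise_pairs (l1 l2 : List Int) (h1 : l1.Pairwise (· < ·)) (h2 : l2.Pairwise (· < ·)) :
    (l1.flatMap fun a => l2.map fun b => (a, b)).Pairwise
      (fun p q : Int × Int => p.1 < q.1 ∨ (p.1 = q.1 ∧ p.2 < q.2)) := by
  induction l1 with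
  | nil => exact List.Pairwise.nil
  | cons a l1 ih =>
    rw [List.pairwise_cons] at h1
    simp only [List.flatMap_cons]
    rw [List.pairwise_append]
    refine ⟨?_, ih h1.2, ?_⟩
    · rw [List.pairwise_map]
      exact h2.imp (fun h => Or.inr ⟨rfl, h⟩)
    · intro x hx y hy
      rw [List.mem_map] at hx
      obtain ⟨b, _, rfl⟩ := hx
      rw [List.mem_flatMap] at hy
      obtain ⟨a', ha', hy⟩ := hy
      rw [List.mem_map] at hy
      obtain ⟨b', _, rfl⟩ := hy
      exact Or.inl (h1.1 a' ha')

lemma pairwise_divList (n : Int) : (divList n).Pairwise (· < ·) := by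
  unfold divList
  exact (PySem.List.pairwise_lt_pyRange_one 1 (n + 1)).filter _

-- ===== VERDICT (by name: the statement is the Claim_ definition above) =====
theorem find_max_subblock_spec : Claim_equal_find_max_subblock := by
  intro h w md _
  unfold Spec_find_max_subblock find_max_subblock find_max_subblock_alt
  simp only [fmsDivisors_eq]
  -- convert A's skip-on-nondivisor folds into folds over the divisor lists
  have hinner : ∀ (st : Int × Int × Int) (sh : Int),
      (PySem.List.pyRange 1 (w + 1) 1).foldl (fun st2 sw =>
        if PySem.Int.mod w sw ≠ 0 then st2
        else if sh * sw ≤ md ∧ sh * sw ≥ st2.2.2 then (sh, sw, sh * sw) else st2) st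
      = (divList w).foldl (fun st2 sw =>
          if sh * sw ≤ md ∧ sh * sw ≥ st2.2.2 then (sh, sw, sh * sw) else st2) st := by
    intro st sh
    exact foldl_skip_filter w _ _ st
  have houter :
      (PySem.List.pyRange 1 (h + 1) 1).foldl (fun st sh =>
        if PySem.Int.mod h sh ≠ 0 then st
        else (PySem.List.pyRange 1 (w + 1) 1).foldl (fun st2 sw =>
          if PySem.Int.mod w sw ≠ 0 then st2
          else if sh * sw ≤ md ∧ sh * sw ≥ st2.2.2 then (sh, sw, sh * sw) else st2) st)
        ((1 : Int), (1 : Int), (1 : Int))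
      = (divList h).foldl (fun st sh => (divList w).foldl (fun st2 sw =>
          if sh * sw ≤ md ∧ sh * sw ≥ st2.2.2 then (sh, sw, sh * sw) else st2) st) (1, 1, 1) := by
    rw [foldl_skip_filter h _ _ _]
    simp only [hinner]
    rfl
  rw [houter]
  -- flatten both nested folds over the same pair list and apply the invariant
  rw [foldl_nested (fun st2 p => if p.1 * p.2 ≤ md ∧ p.1 * p.2 ≥ st2.2.2 then (p.1, p.2, p.1 * p.2) else st2) (divList h) (divList w) (1, 1, 1)]
  rw [foldl_nested (fun b2 p => if p.1 * p.2 ≤ md then fmsMax b2 (p.1 * p.2, p.1, p.2) else b2) (divList h) (divList w) (1, 1, 1)]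
  have hpos : ∀ p ∈ (divList h).flatMap (fun a => (divList w).map (fun b => (a, b))),
      1 ≤ p.1 ∧ 1 ≤ p.2 := by
    intro p hp
    rw [List.mem_flatMap] at hp
    obtain ⟨a, ha, hp⟩ := hp
    rw [List.mem_map] at hp
    obtain ⟨b, hb, rfl⟩ := hp
    rw [mem_divList] at ha hb
    exact ⟨ha.1, hb.1⟩
  have hmain := main_invariant md ((divList h).flatMap (fun a => (divList w).map (fun b => (a, b))))
    (1, 1, 1) hpos
    (pairwise_pairs _ _ (pairwise_divList h) (pairwise_divList w))
    (fun p hp => by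
      rcases lt_or_eq_of_le (hpos p hp).1 with h1 | h1
      · exact Or.inl h1
      · exact Or.inr ⟨h1, (hpos p hp).2⟩)
  rw [hmain]
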